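-- pv_equiv track=rewrite | github.com/MrBrantCode/unitest_baseline | mut_generate/mist_train_cf/cf_5228/solution.py | calculate_prime_stats
-- ===== SOURCE A (Python) =====
-- def calculate_prime_stats(prime_numbers):
--     """
--     This function calculates the sum of the prime numbers, finds the largest and smallest prime numbers,
--     and returns their sum, largest number, smallest number, and the prime numbers in descending order.
--
--     Args:
--         prime_numbers (list): A list of prime numbers.
--
--     Returns:
--         tuple: A tuple containing the sum of prime numbers, the largest prime number,
--                the smallest prime number, and the prime numbers in descending order.
--     """
--
--     # Initialize variables
--     sum_of_primes = 0
--     largest = prime_numbers[0]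
--     smallest = prime_numbers[0]
--
--     # Iterate through the list
--     for prime in prime_numbers:
--         sum_of_primes += prime
--         if prime > largest:
--             largest = prime
--         if prime < smallest:
--             smallest = prime
--
--     # Return the results
--     return sum_of_primes, largest, smallest, sorted(prime_numbers, reverse=True)
-- ===== SOURCE B (Python) =====
-- def calculate_prime_stats(prime_numbers):
--     # Sort once, descending; read the extremes off the ends of the sorted list.
--     s = sorted(prime_numbers, reverse=True)
--     return sum(s), s[0], s[-1], s
-- ===== Notes on version B (the rewrite author's own statement) =====
-- stated objective: simpler
-- what changed: B sorts the list descending once and reads sum/largest/smallest from the sorted list (s[0], s[-1]) instead of tracking max/min in an explicit accumulator loop.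
import Mathlib
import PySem

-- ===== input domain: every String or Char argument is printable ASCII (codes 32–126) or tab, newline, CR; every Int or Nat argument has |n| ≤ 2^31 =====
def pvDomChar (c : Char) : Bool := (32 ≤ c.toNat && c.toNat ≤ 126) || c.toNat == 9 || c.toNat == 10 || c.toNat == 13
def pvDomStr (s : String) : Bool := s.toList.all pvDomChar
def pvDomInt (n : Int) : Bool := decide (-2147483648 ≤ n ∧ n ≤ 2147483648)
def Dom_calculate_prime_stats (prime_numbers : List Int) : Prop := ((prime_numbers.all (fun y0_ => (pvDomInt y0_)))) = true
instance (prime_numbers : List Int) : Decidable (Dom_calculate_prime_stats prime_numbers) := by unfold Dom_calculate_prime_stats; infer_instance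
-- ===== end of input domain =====

-- B derives sum/largest/smallest from one descending sort (s[0], s[-1]) instead of A's accumulator loop: simpler.

-- ===== PORT A =====
def calculate_prime_stats (prime_numbers : List Int) : Int × Int × Int × List Int :=
  match PySem.List.pyGet? prime_numbers 0 with
  | none => (0, 0, 0, [])   -- unreachable under Pre_ (prime_numbers[0] raises IndexError on [])
  | some h0 =>
    let r := prime_numbers.foldl
      (fun (st : Int × Int × Int) p =>
        (st.1 + p, if p > st.2.1 then p else st.2.1, if p < st.2.2 then p else st.2.2))
      ((0 : Int), h0, h0)
    (r.1, r.2.1, r.2.2, PySem.List.sorted prime_numbers (fun x => x) true)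

-- ===== PORT B =====
def calculate_prime_stats_alt (prime_numbers : List Int) : Int × Int × Int × List Int :=
  let s := PySem.List.sorted prime_numbers (fun x => x) true
  match PySem.List.pyGet? s 0, PySem.List.pyGet? s (-1) with
  | some lg, some sm => (s.foldl (· + ·) 0, lg, sm, s)
  | _, _ => (0, 0, 0, [])   -- unreachable under Pre_ (s[0] raises IndexError on [])

-- ===== PRECONDITION & SPEC =====
-- A raises IndexError on the empty list (prime_numbers[0]); Pre_ excludes exactly that input.
def Pre_calculate_prime_stats (prime_numbers : List Int) : Prop := prime_numbers ≠ []
instance (prime_numbers : List Int) : Decidable (Pre_calculate_prime_stats prime_numbers) := by unfold Pre_calculate_prime_stats; infer_instance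
def pvWitness_calculate_prime_stats : List Int := [5, 2, 11, 3]

def Spec_calculate_prime_stats (prime_numbers : List Int) (out : Int × Int × Int × List Int) : Prop := out = calculate_prime_stats_alt prime_numbers
instance (prime_numbers : List Int) (out : Int × Int × Int × List Int) : Decidable (Spec_calculate_prime_stats prime_numbers out) := by unfold Spec_calculate_prime_stats; infer_instance

-- ===== CLAIM (what is proved, stated in full; the proofs are below) =====
def Claim_equal_calculate_prime_stats : Prop := ∀ (prime_numbers : List Int), Dom_calculate_prime_stats prime_numbers → Pre_calculate_prime_stats prime_numbers → Spec_calculate_prime_stats prime_numbers (calculate_prime_stats prime_numbers)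

-- ===== LEMMAS AND PROOFS =====

-- A's fold splits into its three components: running sum, running max, running min.
theorem pv_foldA_split (l : List Int) (a M m : Int) :
    l.foldl
      (fun (st : Int × Int × Int) p =>
        (st.1 + p, if p > st.2.1 then p else st.2.1, if p < st.2.2 then p else st.2.2))
      (a, M, m)
    = (a + l.sum, l.foldl max M, l.foldl min m) := by
  induction l generalizing a M m with
  | nil => simp
  | cons x t ih =>
    simp only [List.foldl_cons, List.sum_cons, ih]
    have h1 : a + x + t.sum = a + (x + t.sum) := by ring
    have h2 : (if x > M then x else M) = max M x := by rw [max_def]; split <;> split <;> omega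
    have h3 : (if x < m then x else m) = min m x := by rw [min_def]; split <;> split <;> omega
    rw [h1, h2, h3]

theorem pv_foldl_max_le (t : List Int) (c : Int) (hub : ∀ x ∈ t, x ≤ c) :
    t.foldl max c = c := by
  induction t with
  | nil => rfl
  | cons x u ih =>
    have hx := hub x (by simp)
    simp only [List.foldl_cons, max_eq_left hx]
    exact ih (fun y hy => hub y (by simp [hy]))

theorem pv_foldl_max_eq (l : List Int) (M c : Int) (hM : M ≤ c) (hc : c ∈ l)
    (hub : ∀ x ∈ l, x ≤ c) : l.foldl max M = c := by
  induction l generalizing M with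
  | nil => cases hc
  | cons x t ih =>
    simp only [List.foldl_cons]
    rcases List.mem_cons.mp hc with h | h
    · subst h
      rw [max_eq_right hM]
      exact pv_foldl_max_le t c (fun y hy => hub y (by simp [hy]))
    · exact ih _ (max_le hM (hub x (List.mem_cons_self))) h
        (fun y hy => hub y (List.mem_cons_of_mem _ hy))

theorem pv_foldl_min_ge (t : List Int) (c : Int) (hlb : ∀ x ∈ t, c ≤ x) :
    t.foldl min c = c := by
  induction t with
  | nil => rfl
  | cons x u ih =>
    have hx := hlb x (by simp)
    simp only [List.foldl_cons, min_eq_left hx]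
    exact ih (fun y hy => hlb y (by simp [hy]))

theorem pv_foldl_min_eq (l : List Int) (M c : Int) (hM : c ≤ M) (hc : c ∈ l)
    (hlb : ∀ x ∈ l, c ≤ x) : l.foldl min M = c := by
  induction l generalizing M with
  | nil => cases hc
  | cons x t ih =>
    simp only [List.foldl_cons]
    rcases List.mem_cons.mp hc with h | h
    · subst h
      rw [min_eq_right hM]
      exact pv_foldl_min_ge t c (fun y hy => hlb y (by simp [hy]))
    · exact ih _ (le_min hM (hlb x (List.mem_cons_self))) h
        (fun y hy => hlb y (List.mem_cons_of_mem _ hy))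

-- the last element of a weakly descending list is a lower bound of its members
theorem pv_last_pairwise_le (s : List Int) (hp : s.Pairwise (fun a b => b ≤ a))
    (m : Int) (hm : s.getLast? = some m) : ∀ x ∈ s, m ≤ x := by
  induction s with
  | nil => cases hm
  | cons a t ih =>
    intro x hx
    cases t with
    | nil =>
      simp at hm hx
      omega
    | cons b u =>
      rw [List.getLast?_cons_cons] at hm
      have hpt : (b :: u).Pairwise (fun a b => b ≤ a) := (List.pairwise_cons.mp hp).2
      have hmt : m ∈ b :: u := List.mem_of_getLast? hm
      rcases List.mem_cons.mp hx with h | h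
      · subst h
        exact le_trans (le_refl m) ((List.pairwise_cons.mp hp).1 m hmt)
      · exact ih hpt hm x h

-- ===== VERDICT (by name: the statement is the Claim_ definition above) =====
theorem calculate_prime_stats_spec : Claim_equal_calculate_prime_stats := by
  intro l _ hpre
  unfold Spec_calculate_prime_stats calculate_prime_stats calculate_prime_stats_alt
  obtain ⟨h, t, rfl⟩ := List.exists_cons_of_ne_nil hpre
  rw [PySem.List.pyGet?_zero_cons]
  set L := h :: t with hL
  set s := PySem.List.sorted L (fun x => x) true with hs
  have hperm : s.Perm L := PySem.List.sorted_perm ..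
  have hslen : s ≠ [] := by
    intro hnil
    have := hperm.length_eq
    rw [hnil] at this
    simp [hL] at this
  obtain ⟨c, u, hcu⟩ := List.exists_cons_of_ne_nil hslen
  have hub : ∀ y ∈ L, y ≤ c := by
    intro y hy
    have := PySem.List.key_head_sorted_rev_ge (xs := L) (key := fun x => x) (by rw [← hs, hcu]) y hy
    simpa using this
  have hcmem : c ∈ L := hperm.mem_iff.mp (by simp [hcu])
  have hmL : s.getLast? = some ((c :: u).getLast (by simp)) := by
    rw [hcu]; exact List.getLast?_eq_some_getLast _
  set m := (c :: u).getLast (by simp) with hmdef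
  have hmem_m : m ∈ s := by rw [hcu]; exact List.getLast_mem _
  have hmemL_m : m ∈ L := hperm.mem_iff.mp hmem_m
  have hpw : s.Pairwise (fun a b => b ≤ a) := by
    have := PySem.List.sorted_pairwise_rev (xs := L) (key := fun x => x)
    simpa [← hs] using this
  have hlb : ∀ x ∈ L, m ≤ x := by
    intro x hx
    exact pv_last_pairwise_le s hpw m hmL x (hperm.mem_iff.mpr hx)
  have hget0 : PySem.List.pyGet? s 0 = some c := by rw [hcu]; exact PySem.List.pyGet?_zero_cons ..
  have hgetlast : PySem.List.pyGet? s (-1) = some m := by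
    rw [PySem.List.pyGet?_neg_one]; exact hmL
  simp only [hget0, hgetlast, pv_foldA_split]
  have hsum : s.foldl (· + ·) 0 = (0 : Int) + L.sum := by
    rw [← List.sum_eq_foldl, hperm.sum_eq]; omega
  have hmax : L.foldl max h = c := pv_foldl_max_eq L h c (hub h (by simp [hL])) hcmem hub
  have hmin : L.foldl min h = m := pv_foldl_min_eq L h m (hlb h (by simp [hL])) hmemL_m hlb
  simp [hsum, hmax, hmin]
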